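-- pv_equiv track=rewrite | github.com/mindspore-lab/mindnlp | src/mindtorch_v2/_tensor.py | _resolve_neg_one
-- ===== SOURCE A (Python) =====
-- def _resolve_neg_one(shape, numel):
--     """Resolve -1 in shape tuple."""
--     neg_one_idx = None
--     known_product = 1
--     for i, s in enumerate(shape):
--         if s == -1:
--             if neg_one_idx is not None:
--                 raise RuntimeError("only one dimension can be inferred")
--             neg_one_idx = i
--         else:
--             known_product *= s
--
--     if neg_one_idx is not None:
--         inferred = numel // known_product
--         shape = list(shape)
--         shape[neg_one_idx] = inferred
--         shape = tuple(shape)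
--
--     return shape
-- ===== SOURCE B (Python) =====
-- def _resolve_neg_one(shape, numel):
--     """Resolve -1 in shape tuple."""
--     def go(lo, hi):
--         # divide and conquer over shape[lo:hi]:
--         # returns (dims with None placeholder for -1, product of known dims, found -1?)
--         if hi - lo == 1:
--             s = shape[lo]
--             if s == -1:
--                 return [None], 1, True
--             return [s], s, False
--         mid = (lo + hi) // 2
--         left, p1, f1 = go(lo, mid)
--         right, p2, f2 = go(mid, hi)
--         if f1 and f2:
--             raise RuntimeError("only one dimension can be inferred")
--         return left + right, p1 * p2, f1 or f2
--
--     if not shape: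
--         return shape
--     resolved, known, found = go(0, len(shape))
--     if not found:
--         return shape
--     inferred = numel // known
--     return tuple(inferred if x is None else x for x in resolved)
-- ===== Notes on version B (the rewrite author's own statement) =====
-- stated objective: alternative
-- what changed: Replaces A's single stateful left-to-right loop (optional index + conditional running product, then in-place set) with a divide-and-conquer recursion that splits the shape at the midpoint, merges (segment-with-None-placeholder, known product, found flag) triples from the two halves, and finally substitutes numel//known for the placeholder via a map.
import Mathlib
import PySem

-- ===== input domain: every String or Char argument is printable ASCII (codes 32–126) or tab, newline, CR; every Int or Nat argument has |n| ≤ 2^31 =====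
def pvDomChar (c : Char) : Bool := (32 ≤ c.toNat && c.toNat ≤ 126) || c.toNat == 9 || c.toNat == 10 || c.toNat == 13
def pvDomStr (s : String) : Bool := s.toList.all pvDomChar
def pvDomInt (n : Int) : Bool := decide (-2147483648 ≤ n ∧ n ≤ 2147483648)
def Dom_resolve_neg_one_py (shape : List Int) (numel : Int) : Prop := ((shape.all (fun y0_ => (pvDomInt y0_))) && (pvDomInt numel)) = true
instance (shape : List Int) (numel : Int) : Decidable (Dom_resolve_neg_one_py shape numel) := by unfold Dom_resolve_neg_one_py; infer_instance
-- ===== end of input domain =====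

-- B replaces A's single stateful loop by a divide-and-conquer recursion merging
-- (placeholder segment, known product, found flag) triples, then substitutes numel//known
-- for the placeholder via a map: an alternative decomposition, not claimed faster.
-- Where Python raises (two -1's: RuntimeError; a -1 together with a 0: ZeroDivisionError),
-- Pre_ excludes the input.

-- ===== PORT A =====
-- the loop body of A: on s == -1 with an index already recorded Python raises (outside Pre_)
def stepA (acc : Option Int × Int) (p : Int × Int) : Option Int × Int :=
  if p.2 = -1 then
    match acc.1 with
    | some _ => acc            -- Python: raise RuntimeError (excluded by Pre_)
    | none => (some p.1, acc.2)
  else (acc.1, acc.2 * p.2)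

def resolve_neg_one_py (shape : List Int) (numel : Int) : List Int :=
  let st := (PySem.List.enumerate shape).foldl stepA (none, 1)
  match st.1 with
  | some i =>
      let inferred := PySem.Int.floordiv numel st.2
      shape.set i.toNat inferred
  | none => shape

-- ===== PORT B =====
-- B's helper go(lo, hi) works on the segment shape[lo:hi]; here the segment is passed
-- directly as a list ((lo+hi)//2 - lo = (hi-lo)//2, so splitting at length/2 is exact).
def goB (l : List Int) : List (Option Int) × Int × Bool :=
  match h : l with
  | [] => ([], 1, false)                               -- unreachable from the call site
  | [s] => if s = -1 then ([none], 1, true) else ([some s], s, false)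
  | _ :: _ :: _ =>
      let mid := l.length / 2
      let r1 := goB (l.take mid)
      let r2 := goB (l.drop mid)
      -- Python: if f1 and f2 then raise RuntimeError (excluded by Pre_)
      (r1.1 ++ r2.1, r1.2.1 * r2.2.1, r1.2.2 || r2.2.2)
termination_by l.length
decreasing_by
  · subst h; simp; omega
  · subst h; simp; omega

def resolve_neg_one_py_alt (shape : List Int) (numel : Int) : List Int :=
  if shape = [] then shape
  else
    let r := goB shape
    if !r.2.2 then shape
    else
      let inferred := PySem.Int.floordiv numel r.2.1
      r.1.map (fun x => match x with | none => inferred | some v => v)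

-- ===== PRECONDITION & SPEC =====
-- Pre_ excludes exactly the raising inputs: two or more -1 entries (RuntimeError), and a
-- -1 together with a 0 entry (ZeroDivisionError: the known product is 0).
def Pre_resolve_neg_one_py (shape : List Int) (numel : Int) : Prop :=
  shape.count (-1) ≤ 1 ∧ ((-1 : Int) ∈ shape → (0 : Int) ∉ shape)
instance (shape : List Int) (numel : Int) : Decidable (Pre_resolve_neg_one_py shape numel) := by
  unfold Pre_resolve_neg_one_py; infer_instance

def pvWitness_resolve_neg_one_py : List Int × Int := ([2, -1, 3], 30)

def Spec_resolve_neg_one_py (shape : List Int) (numel : Int) (out : List Int) : Prop := out = resolve_neg_one_py_alt shape numel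
instance (shape : List Int) (numel : Int) (out : List Int) : Decidable (Spec_resolve_neg_one_py shape numel out) := by unfold Spec_resolve_neg_one_py; infer_instance

-- ===== CLAIM (what is proved, stated in full; the proofs are below) =====
def Claim_equal_resolve_neg_one_py : Prop := ∀ (shape : List Int) (numel : Int), Dom_resolve_neg_one_py shape numel → Pre_resolve_neg_one_py shape numel → Spec_resolve_neg_one_py shape numel (resolve_neg_one_py shape numel)

-- ===== LEMMAS AND PROOFS =====

-- characterisation of B's divide-and-conquer helper, by strong induction on length
theorem goB_eq_aux (n : Nat) : ∀ (l : List Int), l.length ≤ n →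
    goB l = (l.map (fun s => if s = -1 then none else some s),
             (l.filter (fun s => !(s = -1 : Bool))).prod,
             decide ((-1 : Int) ∈ l)) := by
  induction n with
  | zero =>
      intro l hl
      have : l = [] := List.eq_nil_of_length_eq_zero (Nat.le_zero.mp hl)
      subst this; simp [goB]
  | succ n ih =>
      intro l hl
      match l with
      | [] => simp [goB]
      | [s] => by_cases hs : s = -1 <;> simp [goB, hs, eq_comm]
      | a :: b :: rest =>
          rw [goB]
          set L := a :: b :: rest with hL
          have hlen : 2 ≤ L.length := by simp [hL]
          have h1 : (L.take (L.length / 2)).length ≤ n := by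
            simp [List.length_take]; omega
          have h2 : (L.drop (L.length / 2)).length ≤ n := by
            simp [List.length_drop]
            have := hl
            simp [hL] at this ⊢
            omega
          rw [ih _ h1, ih _ h2]
          refine Prod.ext ?_ (Prod.ext ?_ ?_)
          · simp only
            rw [← List.map_append, List.take_append_drop]
          · simp only
            rw [← List.prod_append, ← List.filter_append, List.take_append_drop]
          · simp only
            rw [← Bool.decide_or]
            congr 1
            rw [← List.mem_append, List.take_append_drop]

theorem goB_eq (l : List Int) :
    goB l = (l.map (fun s => if s = -1 then none else some s),
             (l.filter (fun s => !(s = -1 : Bool))).prod,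
             decide ((-1 : Int) ∈ l)) :=
  goB_eq_aux l.length l le_rfl

-- A's loop over a -1-free block just multiplies the running product
theorem foldl_stepA_no_neg_one (l : List Int) (h : (-1 : Int) ∉ l)
    (s : Int) (o : Option Int) (k : Int) :
    (PySem.List.enumerate l s).foldl stepA (o, k) = (o, l.foldl (· * ·) k) := by
  induction l generalizing s k with
  | nil => simp [PySem.List.enumerate_nil]
  | cons x xs ih =>
      have hx : x ≠ -1 := fun hxe => h (by simp [hxe])
      have hxs : (-1 : Int) ∉ xs := fun hm => h (List.mem_cons_of_mem _ hm)
      simp only [PySem.List.enumerate_cons, List.foldl_cons, stepA, hx]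
      exact ih hxs _ _

theorem resolve_neg_one_py_spec_aux (shape : List Int) (numel : Int)
    (hpre : Pre_resolve_neg_one_py shape numel) :
    resolve_neg_one_py shape numel = resolve_neg_one_py_alt shape numel := by
  rcases hpre with ⟨hcount, -⟩
  by_cases hmem : (-1 : Int) ∈ shape
  · -- exactly one -1: split shape at its first occurrence
    obtain ⟨pre, suf, rfl, hnpre⟩ :
        ∃ pre suf, shape = pre ++ (-1 : Int) :: suf ∧ (-1 : Int) ∉ pre := by
      rcases Option.isSome_iff_exists.mp
          ((PySem.List.index?_isSome_iff _ _).mpr hmem) with ⟨k, hk⟩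
      obtain ⟨pre, suf, heq, -, hnp⟩ := (PySem.List.index?_eq_some_iff _ _ _).mp hk
      exact ⟨pre, suf, heq, hnp⟩
    have hnsuf : (-1 : Int) ∉ suf := by
      have := hcount
      simp [List.count_append, List.count_eq_zero.mpr hnpre] at this
      exact List.count_eq_zero.mp (by omega)
    -- A's fold
    have hfold : (PySem.List.enumerate (pre ++ (-1 : Int) :: suf) 0).foldl stepA (none, 1)
        = (some (pre.length : Int), (pre ++ suf).foldl (· * ·) 1) := by
      rw [PySem.List.enumerate_append, List.foldl_append,
        foldl_stepA_no_neg_one pre hnpre 0 none 1,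
        PySem.List.enumerate_cons, List.foldl_cons]
      simp only [stepA]
      rw [foldl_stepA_no_neg_one suf hnsuf _ _ _, List.foldl_append]
      norm_num
    -- B's known product equals A's known product
    have hfilter : ((pre ++ (-1 : Int) :: suf).filter (fun s => !(s = -1 : Bool))).prod
        = (pre ++ suf).foldl (· * ·) 1 := by
      rw [← List.prod_eq_foldl, List.filter_append, List.filter_cons]
      rw [if_neg (by simp)]
      congr 2 <;> exact List.filter_eq_self.mpr (by
        intro x hx
        simp only [Bool.not_eq_eq_eq_not, Bool.not_true, decide_eq_false_iff_not]
        rintro rfl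
        first | exact hnpre hx | exact hnsuf hx)
    -- B's placeholder substitution rebuilds A's set
    have mapid : ∀ (l : List Int) (I : Int), (-1 : Int) ∉ l →
        (l.map (fun s => if s = -1 then (none : Option Int) else some s)).map
          (fun x => match x with | none => I | some v => v) = l := by
      intro l I h
      induction l with
      | nil => simp
      | cons x xs ih =>
          have hx : x ≠ -1 := fun he => h (by simp [he])
          simp only [List.map_cons, if_neg hx]
          rw [ih (fun m => h (List.mem_cons_of_mem _ m))]
    have hsub : ((pre ++ (-1 : Int) :: suf).map
          (fun s => if s = -1 then (none : Option Int) else some s)).map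
          (fun x => match x with
            | none => PySem.Int.floordiv numel ((pre ++ suf).foldl (· * ·) 1)
            | some v => v)
        = pre ++ PySem.Int.floordiv numel ((pre ++ suf).foldl (· * ·) 1) :: suf := by
      simp only [List.map_append, List.map_cons]
      rw [mapid pre _ hnpre, mapid suf _ hnsuf]
      simp
    -- A sets index pre.length
    have hset : (pre ++ (-1 : Int) :: suf).set pre.length
          (PySem.Int.floordiv numel ((pre ++ suf).foldl (· * ·) 1))
        = pre ++ PySem.Int.floordiv numel ((pre ++ suf).foldl (· * ·) 1) :: suf := by
      rw [List.set_append_right _ _ le_rfl]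
      simp
    simp only [resolve_neg_one_py, resolve_neg_one_py_alt, hfold, goB_eq,
      decide_eq_true hmem, Bool.not_true, if_neg (by simp : ¬(pre ++ (-1:Int) :: suf = [])),
      Int.toNat_natCast, hfilter]
    rw [hset, if_neg (by simp)]
    exact hsub.symm
  · -- no -1: both return shape
    have hfold := foldl_stepA_no_neg_one shape hmem 0 none 1
    by_cases hnil : shape = []
    · subst hnil; simp [resolve_neg_one_py, resolve_neg_one_py_alt]
    · simp [resolve_neg_one_py, resolve_neg_one_py_alt, hfold, goB_eq, hmem, hnil]

-- ===== VERDICT (by name: the statement is the Claim_ definition above) =====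
theorem resolve_neg_one_py_spec : Claim_equal_resolve_neg_one_py := by
  intro shape numel _ hpre
  exact resolve_neg_one_py_spec_aux shape numel hpre
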